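-- pv_equiv track=rewrite | github.com/j-mroz/Algorithms-leetcode | codility/lessons/14_binary_search/min_max_division.py | is_large_sum
-- ===== SOURCE A (Python) =====
-- def is_large_sum(A, K, candidate_sum):
--     slice_sum, slice_count = 0, 1
--     for a in A:
--         if a > candidate_sum:
--             return False
--         if slice_sum + a <= candidate_sum:
--             slice_sum += a
--         else:
--             slice_sum = a
--             slice_count += 1
--     return slice_count <= K
-- ===== SOURCE B (Python) =====
-- def _next_start(prefix, limit, n, b):
--     # First index j in (b, n] whose prefix sum exceeds limit marks the end of
--     # the chunk starting at b: the next chunk starts at j - 1.  No such index: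
--     # the chunk runs to the end of the array.
--     for j in range(b + 1, n + 1):
--         if prefix[j] > limit:
--             return j - 1
--     return n
--
--
-- def is_large_sum(A, K, candidate_sum):
--     if not A:
--         return 1 <= K
--     if max(A) > candidate_sum:
--         return False
--     prefix = [0]
--     for a in A:
--         prefix.append(prefix[-1] + a)
--     n = len(A)
--     slices, b = 0, 0
--     while b < n:
--         b = _next_start(prefix, candidate_sum + prefix[b], n, b)
--         slices += 1
--     return slices <= K
-- ===== Notes on version B (the rewrite author's own statement) =====
-- stated objective: alternative
-- what changed: B precomputes a prefix-sum array and counts slices by jumping from chunk boundary to chunk boundary, each boundary found as the first prefix sum exceeding an absolute threshold, with feasibility decided up front by a max() check; A instead runs one element-wise pass with a running slice_sum/slice_count accumulator-and-reset state machine.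
import Mathlib
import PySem

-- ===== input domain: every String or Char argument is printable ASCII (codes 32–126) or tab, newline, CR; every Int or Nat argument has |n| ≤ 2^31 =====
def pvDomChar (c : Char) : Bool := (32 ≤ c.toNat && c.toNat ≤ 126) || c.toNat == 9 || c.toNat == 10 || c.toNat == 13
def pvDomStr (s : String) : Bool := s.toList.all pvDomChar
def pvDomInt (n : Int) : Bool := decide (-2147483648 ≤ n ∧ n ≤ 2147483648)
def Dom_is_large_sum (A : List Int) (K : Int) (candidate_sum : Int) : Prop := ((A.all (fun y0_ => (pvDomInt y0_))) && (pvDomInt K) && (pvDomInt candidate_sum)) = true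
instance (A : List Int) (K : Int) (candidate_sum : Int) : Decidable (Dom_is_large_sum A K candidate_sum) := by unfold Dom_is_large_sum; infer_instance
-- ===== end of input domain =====

-- B replaces A's accumulator-and-reset state machine by a precomputed prefix-sum array
-- scanned boundary-to-boundary (first prefix over an absolute threshold), plus a separate
-- max() feasibility check (alternative decomposition, same O(n) cost); proved equal on all inputs.


-- ===== PORT A =====
-- A's single loop: state (slice_sum, slice_count), early False on a > candidate_sum.
def isLargeSumGo (K : Int) (cs : Int) : List Int → Int → Int → Bool
  | [], _, slice_count => slice_count ≤ K
  | a :: rest, slice_sum, slice_count =>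
    if a > cs then false
    else if slice_sum + a ≤ cs then isLargeSumGo K cs rest (slice_sum + a) slice_count
    else isLargeSumGo K cs rest a (slice_count + 1)

def is_large_sum (A : List Int) (K : Int) (candidate_sum : Int) : Bool :=
  isLargeSumGo K candidate_sum A 0 1

-- ===== PORT B =====
-- Source B's prefix loop ('prefix = [0]; for a in A: prefix.append(prefix[-1] + a)'):
-- the running total s is carried, each step conses the current total.
def prefixList (s : Int) : List Int → List Int
  | [] => [s]
  | a :: rest => s :: prefixList (s + a) rest

-- Source B's _next_start: scan j = b+1 .. n; prefix has length n+1, so the prefix[j]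
-- access is always in range and List.getD is exact here.
def nextStart (P : List Int) (limit : Int) (n : Nat) (j : Nat) : Nat :=
  if j ≤ n then
    (if P.getD j 0 > limit then j - 1 else nextStart P limit n (j + 1))
  else n
termination_by n + 1 - j

-- Source B's 'while b < n' loop; fuel = n bounds the iterations (each consumes ≥ 1 element
-- once the max() check has passed) purely to make the recursion total.
def countLoop (P : List Int) (cs : Int) (n : Nat) : Nat → Nat → Nat → Nat
  | 0, _, slices => slices
  | fuel + 1, b, slices =>
    if b < n then countLoop P cs n fuel (nextStart P (cs + P.getD b 0) n (b + 1)) (slices + 1)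
    else slices

def is_large_sum_alt (A : List Int) (K : Int) (candidate_sum : Int) : Bool :=
  if A.isEmpty then decide ((1 : Int) ≤ K)
  else if (PySem.List.max? A (fun x => x)).getD 0 > candidate_sum then false
  else decide ((countLoop (prefixList 0 A) candidate_sum A.length A.length 0 0 : Int) ≤ K)

-- ===== PRECONDITION & SPEC =====
def Spec_is_large_sum (A : List Int) (K : Int) (candidate_sum : Int) (out : Bool) : Prop := out = is_large_sum_alt A K candidate_sum
instance (A : List Int) (K : Int) (candidate_sum : Int) (out : Bool) : Decidable (Spec_is_large_sum A K candidate_sum out) := by unfold Spec_is_large_sum; infer_instance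

-- ===== CLAIM (what is proved, stated in full; the proofs are below) =====
def Claim_equal_is_large_sum : Prop := ∀ (A : List Int) (K : Int) (candidate_sum : Int), Dom_is_large_sum A K candidate_sum → Spec_is_large_sum A K candidate_sum (is_large_sum A K candidate_sum)

-- ===== LEMMAS AND PROOFS =====

-- Proof-only helpers: the reset count of A's loop from state s, and the chunk
-- decomposition both programs implicitly compute.
def dropChunk (cs : Int) : Int → List Int → List Int
  | _, [] => []
  | s, a :: rest => if s + a ≤ cs then dropChunk cs (s + a) rest else a :: rest

theorem dropChunk_length_le (cs : Int) : ∀ (s : Int) (l : List Int), (dropChunk cs s l).length ≤ l.length := by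
  intro s l
  induction l generalizing s with
  | nil => simp [dropChunk]
  | cons a rest ih =>
    simp only [dropChunk]
    split
    · exact Nat.le_succ_of_le (ih _)
    · exact Nat.le_refl _

def countSlices (cs : Int) (l : List Int) : Nat :=
  match l with
  | [] => 0
  | a :: rest => 1 + countSlices cs (dropChunk cs a rest)
termination_by l.length
decreasing_by
  exact Nat.lt_succ_of_le (dropChunk_length_le cs a rest)

def countRest (cs : Int) : Int → List Int → Nat
  | _, [] => 0
  | s, a :: rest => if s + a ≤ cs then countRest cs (s + a) rest else 1 + countRest cs a rest

theorem goA_of_exists_large (K cs : Int) (l : List Int)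
    (h : ∃ a ∈ l, a > cs) : ∀ (s c : Int), isLargeSumGo K cs l s c = false := by
  induction l with
  | nil => simp at h
  | cons a rest ih =>
    intro s c
    simp only [isLargeSumGo]
    by_cases ha : a > cs
    · simp [ha]
    · have hrest : ∃ x ∈ rest, x > cs := by
        rcases h with ⟨x, hx, hxgt⟩
        rcases List.mem_cons.mp hx with h1 | h2
        · exact absurd (h1 ▸ hxgt) ha
        · exact ⟨x, h2, hxgt⟩
      simp only [ha, if_false]
      split <;> exact ih hrest _ _

theorem goA_of_all_small (K cs : Int) (l : List Int)
    (h : ∀ a ∈ l, ¬ a > cs) : ∀ (s c : Int),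
    isLargeSumGo K cs l s c = decide (c + (countRest cs s l : Int) ≤ K) := by
  induction l with
  | nil => intro s c; simp [isLargeSumGo, countRest]
  | cons a rest ih =>
    intro s c
    have ha : ¬ a > cs := h a (List.mem_cons_self ..)
    have hrest : ∀ x ∈ rest, ¬ x > cs := fun x hx => h x (List.mem_cons_of_mem a hx)
    simp only [isLargeSumGo, countRest, ha, if_false]
    split
    · exact ih hrest _ _
    · rw [ih hrest a (c + 1)]
      congr 1
      push_cast
      rw [add_assoc]

theorem countRest_eq_countSlices_dropChunk (cs : Int) (l : List Int) :
    ∀ s : Int, countRest cs s l = countSlices cs (dropChunk cs s l) := by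
  induction l with
  | nil => intro s; simp [countRest, dropChunk, countSlices]
  | cons a rest ih =>
    intro s
    simp only [countRest, dropChunk]
    split
    · exact ih _
    · rw [countSlices]
      simp [ih a]

theorem dropChunk_eq_drop (cs : Int) : ∀ (s : Int) (l : List Int),
    dropChunk cs s l = l.drop (l.length - (dropChunk cs s l).length) := by
  intro s l
  induction l generalizing s with
  | nil => simp [dropChunk]
  | cons a rest ih =>
    simp only [dropChunk]
    split
    · have hle := dropChunk_length_le cs (s + a) rest
      have hk : (a :: rest).length - (dropChunk cs (s + a) rest).length
          = (rest.length - (dropChunk cs (s + a) rest).length) + 1 := by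
        simp only [List.length_cons]; omega
      rw [hk, List.drop_succ_cons]
      exact ih (s + a)
    · simp

theorem prefix_step (l : List Int) : ∀ (s : Int) (j : Nat) (a : Int) (rest : List Int),
    l.drop j = a :: rest →
    (prefixList s l).getD (j + 1) 0 = (prefixList s l).getD j 0 + a := by
  induction l with
  | nil => intro s j a rest h; simp at h
  | cons x xs ih =>
    intro s j a rest h
    cases j with
    | zero =>
      simp only [List.drop_zero] at h
      injection h with h1 h2
      subst h1; subst h2
      cases xs <;> simp [prefixList]
    | succ j =>
      simp only [List.drop_succ_cons] at h
      simp only [prefixList, List.getD_cons_succ]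
      exact ih (s + x) j a rest h

theorem nextStart_spec (A0 : List Int) (cs limit : Int) :
    ∀ (l : List Int) (j : Nat) (s : Int), 1 ≤ j →
    (j - 1) + l.length = A0.length → A0.drop (j - 1) = l →
    (prefixList 0 A0).getD (j - 1) 0 = limit - cs + s →
    nextStart (prefixList 0 A0) limit A0.length j
      = (j - 1) + (l.length - (dropChunk cs s l).length) := by
  intro l
  induction l with
  | nil =>
    intro j s hj hlen _ _
    simp only [List.length_nil] at hlen
    rw [nextStart]
    simp [show ¬ j ≤ A0.length by omega, dropChunk]
    omega
  | cons a rest ih =>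
    intro j s hj hlen hdrop hs
    have hjle : j ≤ A0.length := by simp at hlen; omega
    have hstep : (prefixList 0 A0).getD j 0 = (prefixList 0 A0).getD (j - 1) 0 + a := by
      have := prefix_step A0 0 (j - 1) a rest hdrop
      have hj1 : j - 1 + 1 = j := by omega
      rwa [hj1] at this
    rw [nextStart]
    simp only [hjle, if_true]
    by_cases hcond : s + a ≤ cs
    · have hnot : ¬ (prefixList 0 A0).getD j 0 > limit := by
        rw [hstep, hs]; omega
      simp only [hnot, if_false]
      have hdrop' : A0.drop j = rest := by
        have h1 : List.drop 1 (A0.drop (j - 1)) = A0.drop j := by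
          rw [List.drop_drop]; congr 1; omega
        rw [← h1, hdrop]; rfl
      have := ih (j + 1) (s + a) (by omega)
        (by simp at hlen ⊢; omega)
        (by simpa using hdrop')
        (by simp only [Nat.add_sub_cancel]; rw [hstep, hs]; ring)
      rw [this]
      have h1 := dropChunk_length_le cs (s + a) rest
      simp only [dropChunk, hcond, if_true, List.length_cons]
      omega
    · have hgt : (prefixList 0 A0).getD j 0 > limit := by
        rw [hstep, hs]; omega
      simp only [hgt, if_true]
      simp [dropChunk, hcond]

theorem countLoop_spec (A0 : List Int) (cs : Int) (hall : ∀ x ∈ A0, x ≤ cs) :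
    ∀ (fuel : Nat) (l : List Int) (b slices : Nat),
    l.length ≤ fuel → b + l.length = A0.length → A0.drop b = l →
    countLoop (prefixList 0 A0) cs A0.length fuel b slices = slices + countSlices cs l := by
  intro fuel
  induction fuel with
  | zero =>
    intro l b slices hfuel _ _
    have : l = [] := List.eq_nil_of_length_eq_zero (by omega)
    subst this
    simp [countLoop, countSlices]
  | succ fuel ih =>
    intro l b slices hfuel hlen hdrop
    rw [countLoop]
    by_cases hb : b < A0.length
    · simp only [hb, if_true]
      cases l with
      | nil => simp only [List.length_nil] at hlen; omega
      | cons a rest =>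
        have ha : a ≤ cs := hall a (by
          have : a ∈ A0.drop b := by rw [hdrop]; exact List.mem_cons_self ..
          exact List.drop_subset _ _ this)
        have hns := nextStart_spec A0 cs (cs + (prefixList 0 A0).getD b 0)
          (a :: rest) (b + 1) 0 (by omega)
          (by simpa using hlen) (by simpa using hdrop)
          (by simp only [Nat.add_sub_cancel]; omega)
        simp only [Nat.add_sub_cancel] at hns
        have hdc0 : dropChunk cs 0 (a :: rest) = dropChunk cs a rest := by
          simp [dropChunk, ha]
        rw [hns, hdc0]
        set dc := dropChunk cs a rest with hdcdef
        have hdlen : dc.length ≤ rest.length := dropChunk_length_le cs a rest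
        have hdropk : A0.drop (b + ((a :: rest).length - dc.length)) = dc := by
          have h1 : A0.drop (b + ((a :: rest).length - dc.length))
              = (A0.drop b).drop ((a :: rest).length - dc.length) := by
            rw [List.drop_drop]
          rw [h1, hdrop]
          have h2 := dropChunk_eq_drop cs 0 (a :: rest)
          rw [hdc0] at h2
          exact h2.symm
        rw [ih dc (b + ((a :: rest).length - dc.length)) (slices + 1)
          (by simp only [List.length_cons] at hfuel; omega)
          (by simp only [List.length_cons] at hlen ⊢; omega) hdropk]
        have hcnt : countSlices cs (a :: rest) = 1 + countSlices cs dc := by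
          conv_lhs => rw [countSlices]
        omega
    · simp only [hb, if_false]
      have : l = [] := List.eq_nil_of_length_eq_zero (by omega)
      subst this
      simp [countSlices]

-- ===== VERDICT (by name: the statement is the Claim_ definition above) =====
theorem is_large_sum_spec : Claim_equal_is_large_sum := by
  intro A K cs _
  unfold Spec_is_large_sum is_large_sum is_large_sum_alt
  cases A with
  | nil => simp [isLargeSumGo]
  | cons a0 rest0 =>
    have hne : ¬ (a0 :: rest0).isEmpty := by simp
    obtain ⟨m, hm⟩ : ∃ m, PySem.List.max? (a0 :: rest0) (fun x => x) = some m := by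
      cases h : PySem.List.max? (a0 :: rest0) (fun x => x) with
      | none => exact absurd ((PySem.List.max?_eq_none_iff _ _).mp h) (by simp)
      | some m => exact ⟨m, rfl⟩
    have hmmem : m ∈ a0 :: rest0 := PySem.List.max?_mem hm
    have hmmax : ∀ y ∈ a0 :: rest0, y ≤ m := fun y hy => PySem.List.max?_isMax hm y hy
    simp only [hne, hm, Option.getD_some]
    by_cases hbig : ∃ x ∈ a0 :: rest0, x > cs
    · rw [goA_of_exists_large K cs _ hbig 0 1]
      rcases hbig with ⟨x, hx, hxgt⟩
      have : m > cs := lt_of_lt_of_le hxgt (hmmax x hx)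
      simp [this]
    · have hall : ∀ x ∈ a0 :: rest0, x ≤ cs := by
        intro x hx
        by_contra hgt
        exact hbig ⟨x, hx, by omega⟩
      have hm_small : ¬ m > cs := by have := hall m hmmem; omega
      simp only [hm_small, if_false]
      rw [goA_of_all_small K cs _ (fun x hx hgt => hbig ⟨x, hx, hgt⟩) 0 1]
      rw [countLoop_spec (a0 :: rest0) cs hall (a0 :: rest0).length (a0 :: rest0) 0 0
        (le_refl _) (by simp) (by simp)]
      have ha0 : a0 ≤ cs := hall a0 (List.mem_cons_self ..)
      have hcr : 1 + countRest cs 0 (a0 :: rest0) = countSlices cs (a0 :: rest0) := by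
        have h1 : countRest cs 0 (a0 :: rest0) = countRest cs a0 rest0 := by
          simp only [countRest, zero_add, if_pos ha0]
        rw [h1, countRest_eq_countSlices_dropChunk cs rest0 a0]
        conv_rhs => rw [countSlices]
      have hcast : (1 : Int) + (countRest cs 0 (a0 :: rest0) : Int)
          = ((0 + countSlices cs (a0 :: rest0) : Nat) : Int) := by push_cast; omega
      rw [hcast]
      simp
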